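-- pv_equiv track=rewrite | github.com/j-mye/gambling | notebooks/mega_final_project_helpers.py | parse_cards
-- ===== SOURCE A (Python) =====
-- RANK_MAP = {
--     "2": 2, "3": 3, "4": 4, "5": 5, "6": 6, "7": 7,
--     "8": 8, "9": 9, "T": 10, "J": 11, "Q": 12, "K": 13, "A": 14,
-- }
--
-- def parse_cards(value: object) -> list[str]:
--     if value is None:
--         return []
--     text = str(value).strip()
--     if text in {"", "0", "--", "nan", "None"}:
--         return []
--     out: list[str] = []
--     for token in text.split():
--         t = token.strip()
--         if len(t) >= 3 and t[:2].upper() == "10":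
--             suit = t[2].lower()
--             if suit in {"c", "d", "h", "s"}:
--                 out.append(f"10{suit}")
--             continue
--         if len(t) < 2:
--             continue
--         rank = t[0].upper()
--         suit = t[1].lower()
--         if rank in RANK_MAP and suit in {"c", "d", "h", "s"}:
--             out.append(f"{rank}{suit}")
--     return out
-- ===== SOURCE B (Python) =====
-- RANK_MAP = {
--     "2": 2, "3": 3, "4": 4, "5": 5, "6": 6, "7": 7,
--     "8": 8, "9": 9, "T": 10, "J": 11, "Q": 12, "K": 13, "A": 14,
-- }
--
-- # Anchored, case-insensitive card pattern as an alternation scan: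
-- # "10" first, then the single-character ranks, each followed by a suit.
-- RANKS = ("10",) + tuple(RANK_MAP)
-- SUITS = "cdhs"
--
--
-- def _match(token: str):
--     for r in RANKS:
--         n = len(r)
--         if token[:n].upper() == r and len(token) > n and token[n].lower() in SUITS:
--             return r + token[n].lower()
--     return None
--
--
-- def parse_cards(value: object) -> list[str]:
--     if value is None:
--         return []
--     text = str(value).strip()
--     if text in {"", "0", "--", "nan", "None"}:
--         return []
--     return [c for c in map(_match, text.split()) if c is not None]
-- ===== Notes on version B (the rewrite author's own statement) =====
-- stated objective: idiomatic
-- what changed: A's hand-written two/three-character length branches per token are replaced by a single anchored, case-insensitive alternation scan ('10' first, then the single-character ranks, each followed by a suit) applied to each whitespace-split token, collected with a comprehension.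
import Mathlib
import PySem

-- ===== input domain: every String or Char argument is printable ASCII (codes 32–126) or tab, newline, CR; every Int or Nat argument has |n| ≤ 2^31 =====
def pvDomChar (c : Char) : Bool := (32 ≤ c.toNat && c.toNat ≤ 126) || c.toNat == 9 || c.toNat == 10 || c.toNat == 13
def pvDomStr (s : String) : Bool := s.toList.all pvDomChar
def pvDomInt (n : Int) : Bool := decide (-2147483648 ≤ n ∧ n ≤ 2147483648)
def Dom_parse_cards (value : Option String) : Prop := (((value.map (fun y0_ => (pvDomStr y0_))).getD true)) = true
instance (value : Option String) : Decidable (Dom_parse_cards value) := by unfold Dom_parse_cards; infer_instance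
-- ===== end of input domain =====

-- B replaces A's hand-written two/three-character length branches by a single anchored
-- alternation scan per token ("10" first, then the single-character ranks, each followed
-- by a suit), as a regex-style matcher (objective: idiomatic; same cost).

-- the four suit characters {"c","d","h","s"}
def pcSuits : List Char := ['c', 'd', 'h', 's']
-- the keys of RANK_MAP (the test `rank in RANK_MAP` is membership among its keys)
def pcRanks : List Char := ['2', '3', '4', '5', '6', '7', '8', '9', 'T', 'J', 'Q', 'K', 'A']

-- ===== PORT A =====
def parse_cards (value : Option String) : List String :=
  match value with
  | none => []
  | some v =>
    let text := PySem.Str.strip v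
    if text ∈ (["", "0", "--", "nan", "None"] : List String) then []
    else
      (PySem.Str.split₀ text).foldl (fun out token =>
        let tl := (PySem.Str.strip token).toList
        if 3 ≤ tl.length ∧ PySem.Chars.upper (PySem.List.slice tl none (some 2)) = ['1', '0'] then
          -- t[2] is in range: guarded by len(t) >= 3
          let suit := PySem.Chars.lowerChar ((PySem.List.pyGet? tl 2).getD ' ')
          if suit ∈ pcSuits then out ++ [String.ofList ['1', '0', suit]] else out
        else if tl.length < 2 then out
        else
          -- t[0], t[1] are in range: len(t) >= 2 here
          let rank := PySem.Chars.upperChar ((PySem.List.pyGet? tl 0).getD ' ')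
          let suit := PySem.Chars.lowerChar ((PySem.List.pyGet? tl 1).getD ' ')
          if rank ∈ pcRanks ∧ suit ∈ pcSuits then out ++ [String.ofList [rank, suit]] else out) []

-- ===== PORT B =====
-- RANKS = ("10",) + tuple(RANK_MAP)
def pcRankStrs : List (List Char) := ['1', '0'] :: pcRanks.map (fun c => [c])

-- _match: the first alternative whose uppercased prefix equals the rank and which is
-- immediately followed by a suit character
def pcScan : List (List Char) → List Char → Option (List Char)
  | [], _ => none
  | r :: rs, token =>
    let n := r.length
    if PySem.Chars.upper (PySem.List.slice token none (some (n : Int))) = r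
        ∧ n < token.length
        ∧ PySem.Chars.lowerChar ((PySem.List.pyGet? token (n : Int)).getD ' ') ∈ pcSuits then
      -- token[n] is in range: guarded by len(token) > n
      some (r ++ [PySem.Chars.lowerChar ((PySem.List.pyGet? token (n : Int)).getD ' ')])
    else pcScan rs token

def parse_cards_alt (value : Option String) : List String :=
  match value with
  | none => []
  | some v =>
    let text := PySem.Str.strip v
    if text ∈ (["", "0", "--", "nan", "None"] : List String) then []
    else
      ((PySem.Str.split₀ text).map (fun tok => pcScan pcRankStrs tok.toList)).filterMap
        (fun c => c.map String.ofList)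

-- ===== PRECONDITION & SPEC =====
def Spec_parse_cards (value : Option String) (out : List String) : Prop := out = parse_cards_alt value
instance (value : Option String) (out : List String) : Decidable (Spec_parse_cards value out) := by unfold Spec_parse_cards; infer_instance

-- ===== CLAIM (what is proved, stated in full; the proofs are below) =====
def Claim_equal_parse_cards : Prop := ∀ (value : Option String), Dom_parse_cards value → Spec_parse_cards value (parse_cards value)

-- ===== LEMMAS AND PROOFS =====

theorem pc_dropWhile_eq_self {p : Char → Bool} {l : List Char} (h : ∀ c ∈ l, p c = false) :
    List.dropWhile p l = l := by
  cases l with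
  | nil => rfl
  | cons a t => simp [List.dropWhile, h a (by simp)]

theorem pc_strip_eq_self {l : List Char} (h : ∀ c ∈ l, PySem.Chars.isspace c = false) :
    PySem.Chars.strip l = l := by
  have h1 : PySem.Chars.lstrip l = l := pc_dropWhile_eq_self h
  have h2 : List.dropWhile PySem.Chars.isspace l.reverse = l.reverse :=
    pc_dropWhile_eq_self (fun c hc => h c (List.mem_reverse.mp hc))
  simp [PySem.Chars.strip, PySem.Chars.rstrip, h1, h2]

-- every token produced by split() is whitespace-free
theorem pc_split₀_go_nospace (s : List Char) : ∀ (cur : List Char) (acc : List (List Char)),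
    (∀ c ∈ cur, PySem.Chars.isspace c = false) →
    (∀ t ∈ acc, ∀ c ∈ t, PySem.Chars.isspace c = false) →
    ∀ t ∈ PySem.Chars.split₀.go s cur acc, ∀ c ∈ t, PySem.Chars.isspace c = false := by
  induction s with
  | nil =>
    intro cur acc hcur hacc t ht
    by_cases h : cur.isEmpty
    · rw [show PySem.Chars.split₀.go [] cur acc = acc.reverse by simp [PySem.Chars.split₀.go, h]] at ht
      exact hacc t (by simpa using ht)
    · rw [show PySem.Chars.split₀.go [] cur acc = (cur.reverse :: acc).reverse by
          simp [PySem.Chars.split₀.go, h]] at ht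
      rcases List.mem_cons.mp (List.mem_reverse.mp ht) with h1 | h1
      · intro c hc; exact hcur c (by simpa [h1] using hc)
      · exact hacc t h1
  | cons a s ih =>
    intro cur acc hcur hacc t ht
    by_cases hsp : PySem.Chars.isspace a
    · by_cases h : cur.isEmpty
      · exact ih [] acc (by simp) hacc t (by simpa [PySem.Chars.split₀.go, hsp, h] using ht)
      · refine ih [] (cur.reverse :: acc) (by simp) ?_ t
          (by simpa [PySem.Chars.split₀.go, hsp, h] using ht)
        intro u hu c hc
        rcases List.mem_cons.mp hu with hu | hu
        · exact hcur c (by simpa [hu] using hc)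
        · exact hacc u hu c hc
    · refine ih (a :: cur) acc ?_ hacc t (by simpa [PySem.Chars.split₀.go, hsp] using ht)
      intro c hc
      rcases List.mem_cons.mp hc with hc | hc
      · simpa [hc] using hsp
      · exact hcur c hc

theorem pc_split₀_nospace (s : List Char) :
    ∀ t ∈ PySem.Chars.split₀ s, ∀ c ∈ t, PySem.Chars.isspace c = false :=
  pc_split₀_go_nospace s [] [] (by simp) (by simp)

theorem hslice1 (l : List Char) : PySem.List.slice l none (some ((1 : Nat) : Int)) = l.take 1 := by
  rw [PySem.List.slice_to _ (by omega)]; rfl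

theorem hslice2 (l : List Char) : PySem.List.slice l none (some (2 : Int)) = l.take 2 := by
  rw [PySem.List.slice_to _ (by omega)]; rfl

-- the scan over the single-character alternatives is a membership test
theorem pc_scan_singles (rs : List Char) (a b : Char) (rest : List Char) :
    pcScan (rs.map (fun c => [c])) (a :: b :: rest) =
      if PySem.Chars.upperChar a ∈ rs ∧ PySem.Chars.lowerChar b ∈ pcSuits then
        some [PySem.Chars.upperChar a, PySem.Chars.lowerChar b]
      else none := by
  induction rs with
  | nil => simp [pcScan]
  | cons r rs ih =>
    have hget : PySem.List.pyGet? (a :: b :: rest) ((1 : Nat) : Int) = some b := by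
      simp
    simp only [pcScan, List.map_cons, List.length_cons, List.length_nil, Nat.zero_add,
      hslice1, hget, List.take_succ_cons, List.take_zero, PySem.Chars.upper, List.map_cons,
      List.map_nil, Option.getD_some]
    by_cases hr : PySem.Chars.upperChar a = r
    · subst hr
      by_cases hsu : PySem.Chars.lowerChar b ∈ pcSuits
      · rw [if_pos ⟨rfl, by simp, hsu⟩, if_pos ⟨by simp, hsu⟩]; rfl
      · rw [if_neg (by simp [hsu]), ih, if_neg (by simp [hsu]), if_neg (by simp [hsu])]
    · rw [if_neg (by simp [hr]), ih]
      by_cases hm : PySem.Chars.upperChar a ∈ rs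
      · simp [hm, hr]
      · simp [hm, hr]

theorem pc_scan_singles_nil (rs : List Char) : pcScan (rs.map (fun c => [c])) [] = none := by
  induction rs with
  | nil => rfl
  | cons r rs ih => simpa [pcScan] using ih

theorem pc_scan_singles_one (rs : List Char) (a : Char) :
    pcScan (rs.map (fun c => [c])) [a] = none := by
  induction rs with
  | nil => rfl
  | cons r rs ih => simpa [pcScan] using ih

-- the per-token core: A's loop body as an optional card equals B's alternation scan
theorem pc_tok_eq (tl : List Char) :
    (if 3 ≤ tl.length ∧ PySem.Chars.upper (PySem.List.slice tl none (some 2)) = ['1', '0'] then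
        (if PySem.Chars.lowerChar ((PySem.List.pyGet? tl 2).getD ' ') ∈ pcSuits then
          some ['1', '0', PySem.Chars.lowerChar ((PySem.List.pyGet? tl 2).getD ' ')] else none)
      else if tl.length < 2 then none
      else if PySem.Chars.upperChar ((PySem.List.pyGet? tl 0).getD ' ') ∈ pcRanks
              ∧ PySem.Chars.lowerChar ((PySem.List.pyGet? tl 1).getD ' ') ∈ pcSuits then
        some [PySem.Chars.upperChar ((PySem.List.pyGet? tl 0).getD ' '),
              PySem.Chars.lowerChar ((PySem.List.pyGet? tl 1).getD ' ')]
      else none) = pcScan pcRankStrs tl := by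
  match tl with
  | [] =>
    simp [pcScan, pcRankStrs, pc_scan_singles_nil, hslice2, PySem.Chars.upper]
  | [a] =>
    simp [pcScan, pcRankStrs, pc_scan_singles_one, hslice2, PySem.Chars.upper]
  | a :: b :: rest =>
    have hup : PySem.Chars.upper (PySem.List.slice (a :: b :: rest) none (some 2)) =
        [PySem.Chars.upperChar a, PySem.Chars.upperChar b] := by
      simp [hslice2, PySem.Chars.upper]
    have hg0 : PySem.List.pyGet? (a :: b :: rest) 0 = some a := by simp
    have hg1 : PySem.List.pyGet? (a :: b :: rest) 1 = some b := by simp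
    cases rest with
    | nil =>
      have hA1 : ¬(3 ≤ (2 : Nat) ∧
          ([PySem.Chars.upperChar a, PySem.Chars.upperChar b] : List Char) = ['1', '0']) := by
        rintro ⟨h, -⟩; omega
      have hB1 : ¬(([PySem.Chars.upperChar a, PySem.Chars.upperChar b] : List Char) = ['1', '0'] ∧
          (2 : Nat) < 2 ∧ PySem.Chars.lowerChar ((PySem.List.pyGet? [a, b] 2).getD ' ') ∈ pcSuits) := by
        rintro ⟨-, h, -⟩; omega
      simp only [pcScan, pcRankStrs, hup, hg0, hg1, List.length_cons, List.length_nil,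
        Nat.reduceAdd, Nat.cast_ofNat, Option.getD_some]
      rw [if_neg hA1, if_neg (by omega : ¬((2 : Nat) < 2)), if_neg hB1, pc_scan_singles]
    | cons c rest' =>
      have hg2 : PySem.List.pyGet? (a :: b :: c :: rest') 2 = some c := by
        simp [PySem.List.pyGet?, PySem.List.pyIdx?]
        rw [if_pos (by omega)]; rfl
      have hlen : (2 : Nat) < rest'.length + 1 + 1 + 1 := by omega
      simp only [pcScan, pcRankStrs, hup, hg0, hg1, hg2, List.length_cons, List.length_nil,
        Nat.reduceAdd, Nat.cast_ofNat, Option.getD_some]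
      by_cases hP : ([PySem.Chars.upperChar a, PySem.Chars.upperChar b] : List Char) = ['1', '0']
      · obtain ⟨ha, hb⟩ : PySem.Chars.upperChar a = '1' ∧ PySem.Chars.upperChar b = '0' := by
          simpa using hP
        rw [if_pos ⟨by omega, hP⟩]
        by_cases hs : PySem.Chars.lowerChar c ∈ pcSuits
        · rw [if_pos hs, if_pos ⟨hP, hlen, hs⟩]; rfl
        · have hB1 : ¬(([PySem.Chars.upperChar a, PySem.Chars.upperChar b] : List Char) = ['1', '0'] ∧
              (2 : Nat) < rest'.length + 1 + 1 + 1 ∧ PySem.Chars.lowerChar c ∈ pcSuits) := by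
            rintro ⟨-, -, h⟩; exact hs h
          have hm : PySem.Chars.upperChar a ∉ pcRanks := by rw [ha]; decide
          rw [if_neg hs, if_neg hB1, pc_scan_singles, if_neg (fun h => hm h.1)]
      · have hA1 : ¬(3 ≤ rest'.length + 1 + 1 + 1 ∧
            ([PySem.Chars.upperChar a, PySem.Chars.upperChar b] : List Char) = ['1', '0']) := by
          rintro ⟨-, h⟩; exact hP h
        have hB1 : ¬(([PySem.Chars.upperChar a, PySem.Chars.upperChar b] : List Char) = ['1', '0'] ∧
            (2 : Nat) < rest'.length + 1 + 1 + 1 ∧ PySem.Chars.lowerChar c ∈ pcSuits) := by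
          rintro ⟨h, -⟩; exact hP h
        rw [if_neg hA1, if_neg (by omega : ¬(rest'.length + 1 + 1 + 1 < 2)), if_neg hB1,
            pc_scan_singles]

-- A's fold over the tokens equals B's map-then-filterMap
theorem pc_fold_eq : ∀ (tokens : List String),
    (∀ t ∈ tokens, ∀ c ∈ t.toList, PySem.Chars.isspace c = false) →
    ∀ out : List String,
      tokens.foldl (fun out token =>
        let tl := (PySem.Str.strip token).toList
        if 3 ≤ tl.length ∧ PySem.Chars.upper (PySem.List.slice tl none (some 2)) = ['1', '0'] then
          let suit := PySem.Chars.lowerChar ((PySem.List.pyGet? tl 2).getD ' ')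
          if suit ∈ pcSuits then out ++ [String.ofList ['1', '0', suit]] else out
        else if tl.length < 2 then out
        else
          let rank := PySem.Chars.upperChar ((PySem.List.pyGet? tl 0).getD ' ')
          let suit := PySem.Chars.lowerChar ((PySem.List.pyGet? tl 1).getD ' ')
          if rank ∈ pcRanks ∧ suit ∈ pcSuits then out ++ [String.ofList [rank, suit]] else out) out
      = out ++ (tokens.map (fun tok => pcScan pcRankStrs tok.toList)).filterMap
          (fun c => c.map String.ofList)
  | [], _, out => by simp
  | tok :: toks, h, out => by
    have htl : (PySem.Str.strip tok).toList = tok.toList := by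
      rw [PySem.Str.toList_strip]
      exact pc_strip_eq_self (fun c hc => h tok (by simp) c hc)
    simp only [List.foldl_cons]
    rw [pc_fold_eq toks (fun t ht c hc => h t (by simp [ht]) c hc)]
    simp only [htl, List.map_cons, List.filterMap_cons]
    rw [← pc_tok_eq tok.toList]
    split_ifs <;> cases hsc : pcScan pcRankStrs tok.toList <;> simp

-- ===== VERDICT (by name: the statement is the Claim_ definition above) =====
theorem parse_cards_spec : Claim_equal_parse_cards := by
  intro value _
  unfold Spec_parse_cards parse_cards parse_cards_alt
  cases value with
  | none => rfl
  | some v =>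
    simp only
    by_cases hg : PySem.Str.strip v ∈ (["", "0", "--", "nan", "None"] : List String)
    · simp [hg]
    · simp only [if_neg hg]
      refine (pc_fold_eq _ ?_ []).trans (by simp)
      intro t ht c hc
      have : t.toList ∈ PySem.Chars.split₀ (PySem.Str.strip v).toList := by
        rw [← PySem.Str.split₀_map_toList]
        exact List.mem_map_of_mem ht
      exact pc_split₀_nospace _ _ this c hc
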